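-- pv_equiv track=rewrite | github.com/MrBrantCode/unitest_baseline | mut_generate/mist_train_cf/cf_15174/solution.py | replace_punctuation
-- ===== SOURCE A (Python) =====
-- def replace_punctuation(string):
--     punctuation_marks = {'.', ',', '!', '-', '...', '—', '–', '(', ')', '[', ']', '{', '}', ':', ';', '?', '/', '\\'}
--     string_list = list(string)
--     for i in range(len(string_list)):
--         if string_list[i] in punctuation_marks:
--             string_list[i] = ' '
--     new_string = ''.join(string_list)
--     new_string = ' '.join(new_string.split())
--     return new_string
-- ===== SOURCE B (Python) =====
-- def replace_punctuation(string):
--     separators = {'.', ',', '!', '-', '...', '—', '–', '(', ')', '[', ']', '{', '}', ':', ';', '?', '/', '\\'}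
--     tokens = []
--     cur = []
--     for c in string:
--         if c in separators or c.isspace():
--             if cur:
--                 tokens.append(''.join(cur))
--                 cur = []
--         else:
--             cur.append(c)
--     if cur:
--         tokens.append(''.join(cur))
--     return ' '.join(tokens)
-- ===== Notes on version B (the rewrite author's own statement) =====
-- stated objective: alternative
-- what changed: Instead of rewriting punctuation to spaces in a list, re-joining, splitting and joining again (four passes), B tokenizes in a single pass: it accumulates the current word and flushes it whenever a punctuation or whitespace character is seen, then joins the words with single spaces.
import Mathlib
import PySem

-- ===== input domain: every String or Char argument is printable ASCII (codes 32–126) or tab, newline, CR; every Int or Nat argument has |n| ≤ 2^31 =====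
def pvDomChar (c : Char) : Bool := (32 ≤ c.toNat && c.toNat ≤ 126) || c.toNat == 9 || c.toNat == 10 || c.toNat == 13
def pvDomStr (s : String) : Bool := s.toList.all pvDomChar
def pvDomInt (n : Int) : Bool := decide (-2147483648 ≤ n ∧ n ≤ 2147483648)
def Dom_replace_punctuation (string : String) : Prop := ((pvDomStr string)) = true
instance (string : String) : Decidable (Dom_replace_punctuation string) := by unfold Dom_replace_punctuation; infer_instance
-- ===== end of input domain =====

-- B replaces A's four passes (replace punctuation in a list, join, split, join) by a single
-- tokenizing pass that accumulates words and joins them with single spaces (objective: alternative).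

-- ===== PORT A =====
-- the Python set also holds the 3-character string "...", which a single character can never
-- equal, so the character-level set below is exact
def pvPunct : PySem.Set Char :=
  PySem.Set.ofList ['.', ',', '!', '-', '—', '–', '(', ')', '[', ']', '{', '}', ':', ';', '?', '/', '\\']

def replace_punctuation (string : String) : String :=
  let string_list := string.toList
  let string_list2 := (PySem.List.pyRange 0 string_list.length 1).foldl
    (fun sl i => match PySem.List.pyGet? sl i with
      | some c => if pvPunct.contains c then sl.set i.toNat ' ' else sl
      | none => sl) string_list
  let new_string := String.ofList string_list2        -- ''.join(string_list)
  PySem.Str.join " " (PySem.Str.split₀ new_string)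

-- ===== PORT B =====
def pvSeps : PySem.Set Char :=
  PySem.Set.ofList ['.', ',', '!', '-', '—', '–', '(', ')', '[', ']', '{', '}', ':', ';', '?', '/', '\\']

def pvStepS (st : List String × List Char) (c : Char) : List String × List Char :=
  if pvSeps.contains c || PySem.Chars.isspace c then
    if st.2.isEmpty then st else (st.1 ++ [String.ofList st.2], [])
  else (st.1, st.2 ++ [c])

def replace_punctuation_alt (string : String) : String :=
  let st := string.toList.foldl pvStepS ([], [])
  let tokens := if st.2.isEmpty then st.1 else st.1 ++ [String.ofList st.2]
  PySem.Str.join " " tokens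

-- ===== PRECONDITION & SPEC =====
def Spec_replace_punctuation (string : String) (out : String) : Prop := out = replace_punctuation_alt string
instance (string : String) (out : String) : Decidable (Spec_replace_punctuation string out) := by unfold Spec_replace_punctuation; infer_instance

-- ===== CLAIM (what is proved, stated in full; the proofs are below) =====
def Claim_equal_replace_punctuation : Prop := ∀ (string : String), Dom_replace_punctuation string → Spec_replace_punctuation string (replace_punctuation string)

-- ===== LEMMAS AND PROOFS =====

-- A's per-character replacement, as a function
def pvF (c : Char) : Char := if pvPunct.contains c then ' ' else c

-- char-list-level version of B's fold step and of its final flush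
def pvStepC (st : List (List Char) × List Char) (c : Char) : List (List Char) × List Char :=
  if pvSeps.contains c || PySem.Chars.isspace c then
    if st.2.isEmpty then st else (st.1 ++ [st.2], [])
  else (st.1, st.2 ++ [c])

def pvFinC (st : List (List Char) × List Char) : List (List Char) :=
  if st.2.isEmpty then st.1 else st.1 ++ [st.2]

-- a character of A's result is whitespace exactly when B treats the original character as a separator
theorem pv_isspace_pvF (c : Char) :
    PySem.Chars.isspace (pvF c) = (pvSeps.contains c || PySem.Chars.isspace c) := by
  by_cases h : c ∈ pvPunct
  · have h' : c ∈ pvSeps := h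
    simp [pvF, PySem.Set.contains, h, h']
    decide
  · have h' : c ∉ pvSeps := h
    simp [pvF, PySem.Set.contains, h, h']

-- A's index loop IS the elementwise map of pvF
theorem pvA_fold_eq_map : ∀ (m k : Nat) (l : List Char), l.length - k = m →
    (PySem.List.pyRange k l.length 1).foldl
      (fun sl i => match PySem.List.pyGet? sl i with
        | some c => if pvPunct.contains c then sl.set i.toNat ' ' else sl
        | none => sl) l = l.take k ++ (l.drop k).map pvF := by
  intro m
  induction m with
  | zero =>
    intro k l h
    have hk : l.length ≤ k := by omega
    rw [PySem.List.pyRange_one_eq_nil (by exact_mod_cast hk)]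
    simp [List.take_of_length_le hk, List.drop_of_length_le hk]
  | succ n ih =>
    intro k l h
    have hk : k < l.length := by omega
    rw [PySem.List.pyRange_one_cons (by exact_mod_cast hk)]
    simp only [List.foldl_cons, PySem.List.pyGet?_natCast, List.getElem?_eq_getElem hk,
      Int.toNat_natCast]
    have hstep : (if pvPunct.contains l[k] then l.set k ' ' else l) = l.set k (pvF l[k]) := by
      unfold pvF
      by_cases hc : l[k] ∈ pvPunct <;>
        simp [PySem.Set.contains, hc, List.set_getElem_self]
    rw [hstep]
    have hlen : (l.set k (pvF l[k])).length = l.length := by simp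
    have := ih (k+1) (l.set k (pvF l[k])) (by simp; omega)
    rw [hlen] at this
    push_cast at this ⊢
    rw [this]
    rw [List.set_eq_take_append_cons_drop]
    simp only [hk, if_pos]
    rw [List.take_append, List.drop_append]
    have h2 : (List.take k l).length = k := by
      simp [Nat.min_eq_left hk.le]
    have h1 : List.take (k+1) (List.take k l) = List.take k l := by
      rw [List.take_take]
      congr 1
      omega
    have h4 : List.drop (k+1) (List.take k l) = [] := by
      apply List.drop_eq_nil_of_le
      omega
    rw [h1, h2, h4]
    have h3 : k + 1 - k = 1 := by omega
    rw [h3]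
    rw [List.drop_eq_getElem_cons hk]
    simp only [List.append_assoc, List.nil_append, List.take_succ_cons, List.take_zero,
      List.drop_succ_cons, List.drop_zero, List.map_cons, List.singleton_append]

-- tokens already emitted are a frozen prefix of B's state
theorem pv_prefix : ∀ (sl : List Char) (t0 t : List (List Char)) (cur : List Char),
    sl.foldl pvStepC (t0 ++ t, cur) =
      (t0 ++ (sl.foldl pvStepC (t, cur)).1, (sl.foldl pvStepC (t, cur)).2) := by
  intro sl
  induction sl with
  | nil => intro t0 t cur; simp
  | cons c rest ih =>
    intro t0 t cur
    by_cases hs : (pvSeps.contains c || PySem.Chars.isspace c) = true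
    · by_cases hc : cur.isEmpty
      · simp only [List.foldl_cons, pvStepC, hs, if_pos, hc]
        exact ih t0 t cur
      · simp only [List.foldl_cons, pvStepC, hs, if_pos, hc, List.append_assoc]
        exact ih t0 (t ++ [cur]) []
    · simp only [List.foldl_cons, pvStepC, hs]
      exact ih t0 t (cur ++ [c])

-- the split₀ scanner over A's rewritten characters computes B's token list
theorem pv_go_eq : ∀ (sl cur : List Char) (acc : List (List Char)),
    PySem.Chars.split₀.go (sl.map pvF) cur.reverse acc =
      acc.reverse ++ pvFinC (sl.foldl pvStepC ([], cur)) := by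
  intro sl
  induction sl with
  | nil =>
    intro cur acc
    by_cases hc : cur.isEmpty <;>
      simp [PySem.Chars.split₀.go, pvFinC, hc]
  | cons c rest ih =>
    intro cur acc
    simp only [List.map_cons, PySem.Chars.split₀.go, pv_isspace_pvF]
    by_cases hs : (c ∈ pvSeps ∨ PySem.Chars.isspace c = true)
    · by_cases hc : cur.isEmpty
      · have hcur : cur = [] := List.isEmpty_iff.mp hc
        subst hcur
        have := ih [] acc
        simp only [List.reverse_nil] at this
        simp [PySem.Set.contains, hs, pvStepC, this]
      · have h2 := ih [] (cur :: acc)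
        simp only [List.reverse_nil] at h2
        have hp := pv_prefix rest [cur] [] []
        simp only [List.append_nil] at hp
        have hfin : pvFinC (cur :: (rest.foldl pvStepC ([], [])).1,
            (rest.foldl pvStepC ([], [])).2) = cur :: pvFinC (rest.foldl pvStepC ([], [])) := by
          unfold pvFinC
          by_cases h3 : (rest.foldl pvStepC ([], [])).2.isEmpty <;> simp [h3]
        simp [PySem.Set.contains, hs, hc, pvStepC, h2, hp, hfin]
    · push_neg at hs
      have hs1 : c ∉ pvPunct := hs.1
      have hpf : pvF c = c := by simp [pvF, PySem.Set.contains, hs1]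
      have hrev : (c :: cur.reverse) = (cur ++ [c]).reverse := by simp
      rw [hpf, hrev, ih (cur ++ [c]) acc]
      simp [pvStepC, hs.1, hs.2]

-- B's String-level fold is the char-list-level fold with the tokens rendered as strings
theorem pv_stepS_eq : ∀ (sl : List Char) (t : List (List Char)) (cur : List Char),
    sl.foldl pvStepS (t.map String.ofList, cur) =
      ((sl.foldl pvStepC (t, cur)).1.map String.ofList, (sl.foldl pvStepC (t, cur)).2) := by
  intro sl
  induction sl with
  | nil => intro t cur; simp
  | cons c rest ih =>
    intro t cur
    by_cases hs : (pvSeps.contains c || PySem.Chars.isspace c) = true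
    · by_cases hc : cur.isEmpty
      · simp only [List.foldl_cons, pvStepS, pvStepC, hs, if_pos, hc]
        exact ih t cur
      · simp only [List.foldl_cons, pvStepS, pvStepC, hs, if_pos, hc]
        have : t.map String.ofList ++ [String.ofList cur] = (t ++ [cur]).map String.ofList := by
          simp
        rw [this]
        exact ih (t ++ [cur]) []
    · simp only [List.foldl_cons, pvStepS, pvStepC, hs]
      exact ih t (cur ++ [c])

theorem pv_split₀_ofList (l : List Char) :
    PySem.Str.split₀ (String.ofList l) = (PySem.Chars.split₀ l).map String.ofList := by
  have h := PySem.Str.split₀_map_toList (String.ofList l)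
  simp only [String.toList_ofList] at h
  rw [← h, List.map_map]
  have : String.ofList ∘ String.toList = id := by
    funext s
    simp
  rw [this, List.map_id]

-- ===== VERDICT (by name: the statement is the Claim_ definition above) =====
theorem replace_punctuation_spec : Claim_equal_replace_punctuation := by
  intro s _
  unfold Spec_replace_punctuation replace_punctuation replace_punctuation_alt
  dsimp only
  have hA := pvA_fold_eq_map s.toList.length 0 s.toList (by simp)
  push_cast at hA
  rw [hA]
  simp only [List.take_zero, List.drop_zero, List.nil_append]
  rw [pv_split₀_ofList]
  have hgo := pv_go_eq s.toList [] []
  simp only [List.reverse_nil, List.nil_append] at hgo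
  have hchars : PySem.Chars.split₀ (s.toList.map pvF) = pvFinC (s.toList.foldl pvStepC ([], [])) := by
    rw [PySem.Chars.split₀]
    exact hgo
  rw [hchars]
  have hS := pv_stepS_eq s.toList [] []
  simp only [List.map_nil] at hS
  rw [hS]
  unfold pvFinC
  by_cases h3 : (s.toList.foldl pvStepC ([], [])).2.isEmpty <;> simp [h3]
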